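-- pv_equiv track=rewrite | github.com/ccam80/CuNODE | CuNODE_parallelisation_attempts/paralleliser.py | group_operations
-- ===== SOURCE A (Python) =====
-- def group_operations(expression):
--     groups = []
--     current_group = []
--
--     for token in expression:
--         if token in '+-':
--             if current_group:
--                 groups.append(current_group)
--                 current_group = []
--             groups.append([token])
--         else:
--             current_group.append(token)
--
--     if current_group:
--         groups.append(current_group)
--
--     return groups
-- ===== SOURCE B (Python) =====
-- def group_operations(expression):
--     # Staged: first locate every operator token's position, then slice the
--     # expression between consecutive operator positions.
--     groups = []
--     prev = 0
--     for i, t in [(i, t) for i, t in enumerate(expression) if t in '+-']: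
--         if i > prev:
--             groups.append(expression[prev:i])
--         groups.append([t])
--         prev = i + 1
--     if prev < len(expression):
--         groups.append(expression[prev:])
--     return groups
-- ===== Notes on version B (the rewrite author's own statement) =====
-- stated objective: alternative
-- what changed: Two-stage algorithm: first collect every operator's index with enumerate, then build the groups by slicing the expression between consecutive operator positions, instead of A's single streaming pass that flushes a hand-maintained current_group buffer.
import Mathlib
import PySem

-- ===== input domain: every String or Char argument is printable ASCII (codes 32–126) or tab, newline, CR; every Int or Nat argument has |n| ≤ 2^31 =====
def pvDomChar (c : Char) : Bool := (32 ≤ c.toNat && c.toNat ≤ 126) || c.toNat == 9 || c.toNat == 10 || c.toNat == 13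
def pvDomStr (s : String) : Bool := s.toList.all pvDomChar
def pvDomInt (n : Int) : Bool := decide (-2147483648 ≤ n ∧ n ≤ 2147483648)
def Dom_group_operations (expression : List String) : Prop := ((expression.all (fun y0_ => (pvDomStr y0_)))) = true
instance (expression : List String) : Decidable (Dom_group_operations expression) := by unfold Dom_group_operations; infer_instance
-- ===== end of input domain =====

-- B: staged re-implementation — first collect every operator position via enumerate, then slice
-- the expression between consecutive operator positions; no per-token accumulator. Same cost.

-- ===== PORT A =====
-- `token in '+-'` (Python substring membership), exact via PySem.Str.isIn; shared by both ports (same predicate in both Pythons)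
def pvIsOp (t : String) : Bool := PySem.Str.isIn t "+-"

-- one step of A's loop body (state = (groups, current_group))
def pvStep (st : List (List String) × List String) (token : String) : List (List String) × List String :=
  if pvIsOp token then
    let groups := if st.2 ≠ [] then st.1 ++ [st.2] else st.1
    (groups ++ [[token]], ([] : List String))
  else
    (st.1, st.2 ++ [token])

def group_operations (expression : List String) : List (List String) :=
  let st := expression.foldl pvStep ([], [])
  if st.2 ≠ [] then st.1 ++ [st.2] else st.1

-- ===== PORT B =====
-- the list comprehension `[(i, t) for i, t in enumerate(expression) if t in '+-']`
def pvOps (expression : List String) : List (Int × String) :=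
  (PySem.List.enumerate expression 0).filter (fun p => pvIsOp p.2)

-- one step of B's loop body (state = (groups, prev)); slices expression[prev:i] via PySem.List.slice
def pvBStep (expression : List String) (st : List (List String) × Int) (p : Int × String) :
    List (List String) × Int :=
  ((if p.1 > st.2 then st.1 ++ [PySem.List.slice expression (some st.2) (some p.1)] else st.1)
    ++ [[p.2]], p.1 + 1)

def group_operations_alt (expression : List String) : List (List String) :=
  let st := (pvOps expression).foldl (pvBStep expression) (([] : List (List String)), (0 : Int))
  if st.2 < (expression.length : Int) then st.1 ++ [PySem.List.slice expression (some st.2) none]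
  else st.1

-- ===== PRECONDITION & SPEC =====
def Spec_group_operations (expression : List String) (out : List (List String)) : Prop := out = group_operations_alt expression
instance (expression : List String) (out : List (List String)) : Decidable (Spec_group_operations expression out) := by unfold Spec_group_operations; infer_instance

-- ===== CLAIM (what is proved, stated in full; the proofs are below) =====
def Claim_equal_group_operations : Prop := ∀ (expression : List String), Dom_group_operations expression → Spec_group_operations expression (group_operations expression)

-- ===== LEMMAS AND PROOFS =====

-- common reference shape: maximal runs, operators as singletons
def pvRuns : List String → List (List String)
  | [] => []
  | t :: ts =>
    if pvIsOp t then [t] :: pvRuns ts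
    else
      (t :: ts.takeWhile (fun x => !pvIsOp x)) :: pvRuns (ts.dropWhile (fun x => !pvIsOp x))
termination_by ts => ts.length
decreasing_by
  · simp
  · have := List.length_dropWhile_le (p := fun x => !pvIsOp x) (l := ts); simp; omega

-- ---- A-side: A's fold equals pvRuns ----
def pvAux (current : List String) : List String → List (List String)
  | [] => if current ≠ [] then [current] else []
  | t :: ts =>
    if pvIsOp t then
      (if current ≠ [] then [current] else []) ++ [t] :: pvAux [] ts
    else
      pvAux (current ++ [t]) ts

theorem pvAux_foldl (ts : List String) : ∀ (groups : List (List String)) (current : List String),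
    (let st := ts.foldl pvStep (groups, current)
     if st.2 ≠ [] then st.1 ++ [st.2] else st.1)
    = groups ++ pvAux current ts := by
  induction ts with
  | nil => intro groups current; by_cases h : current = [] <;> simp [pvAux, h]
  | cons t ts ih =>
    intro groups current
    simp only [List.foldl_cons, pvAux]
    by_cases hop : pvIsOp t
    · by_cases h : current = [] <;> simp [pvStep, hop, h, ih]
    · simp [pvStep, hop, ih]

theorem pvRuns_head (ts : List String) :
    pvRuns ts
      = (if ts.takeWhile (fun x => !pvIsOp x) ≠ [] then [ts.takeWhile (fun x => !pvIsOp x)] else [])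
        ++ pvRuns (ts.dropWhile (fun x => !pvIsOp x)) := by
  cases ts with
  | nil => simp [pvRuns]
  | cons t ts =>
    by_cases hop : pvIsOp t <;>
      simp [pvRuns, hop]

theorem pvAux_runs (ts : List String) : ∀ (current : List String),
    pvAux current ts
      = (if current ++ ts.takeWhile (fun x => !pvIsOp x) ≠ [] then
           [current ++ ts.takeWhile (fun x => !pvIsOp x)] else [])
        ++ pvRuns (ts.dropWhile (fun x => !pvIsOp x)) := by
  induction ts with
  | nil => intro current; by_cases h : current = [] <;> simp [pvAux, pvRuns, h]
  | cons t ts ih =>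
    intro current
    by_cases hop : pvIsOp t
    · have hnil : pvAux [] ts = pvRuns ts := by
        rw [ih [], pvRuns_head ts]; simp
      by_cases h : current = [] <;>
        simp [pvAux, pvRuns, hop, h, hnil]
    · have : current ++ [t] ++ ts.takeWhile (fun x => !pvIsOp x) ≠ [] := by simp
      simp only [pvAux, hop, Bool.false_eq_true, if_false, ih (current ++ [t]),
        List.takeWhile_cons, List.dropWhile_cons]
      simp

theorem pvA_eq_runs (expression : List String) :
    group_operations expression = pvRuns expression := by
  unfold group_operations
  rw [pvAux_foldl expression [] []]
  rw [pvAux_runs expression []]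
  simp [pvRuns_head expression]

-- ---- B-side: B's staged fold equals pvRuns ----

-- no operator pair survives the filter over an all-non-operator list
theorem pvOps_filter_nil (w : List String) (s : Int) (hw : ∀ x ∈ w, ¬ pvIsOp x) :
    (PySem.List.enumerate w s).filter (fun p => pvIsOp p.2) = [] := by
  rw [List.filter_eq_nil_iff]
  intro p hp
  have : p.2 ∈ (PySem.List.enumerate w s).map (·.2) := List.mem_map_of_mem hp
  rw [PySem.List.map_snd_enumerate] at this
  simpa using hw p.2 this

theorem pv_dropWhile_head {α : Type} (p : α → Bool) :
    ∀ (l : List α) (y : α) (d' : List α), l.dropWhile p = y :: d' → p y = false := by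
  intro l
  induction l with
  | nil => intro y d' h; simp [List.dropWhile] at h
  | cons x xs ih =>
    intro y d' h
    by_cases hp : p x
    · exact ih y d' (by simpa [List.dropWhile, hp] using h)
    · rw [List.dropWhile_cons_of_neg (by simpa using hp)] at h
      obtain ⟨rfl, rfl⟩ := by exact And.intro (List.cons.inj h).1 (List.cons.inj h).2
      simpa using hp

theorem pvRuns_all_nonop (xs : List String) (hw : ∀ x ∈ xs, ¬ pvIsOp x) :
    pvRuns xs = if xs ≠ [] then [xs] else [] := by
  rw [pvRuns_head]
  have ht : xs.takeWhile (fun x => !pvIsOp x) = xs :=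
    List.takeWhile_eq_self_iff.mpr (by intro x hx; simpa using hw x hx)
  have hd : xs.dropWhile (fun x => !pvIsOp x) = [] :=
    List.dropWhile_eq_nil_iff.mpr (by intro x hx; simpa using hw x hx)
  simp [ht, hd, pvRuns]

theorem pvB_invariant : ∀ (n : ℕ) (xs : List String), xs.length ≤ n →
    ∀ (expression : List String) (s : ℕ) (groups : List (List String)),
    xs = expression.drop s →
    (let st := ((PySem.List.enumerate xs (s : Int)).filter (fun p => pvIsOp p.2)).foldl
        (pvBStep expression) (groups, (s : Int))
     if st.2 < (expression.length : Int) then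
       st.1 ++ [PySem.List.slice expression (some st.2) none]
     else st.1)
    = groups ++ pvRuns xs := by
  intro n
  induction n with
  | zero =>
    intro xs hn expression s groups hxs
    have : xs = [] := List.eq_nil_of_length_eq_zero (Nat.le_zero.mp hn)
    subst this
    have hs : expression.length ≤ s := by
      have := congrArg List.length hxs; simp at this; omega
    simp [PySem.List.enumerate, pvRuns]
    omega
  | succ n ih =>
    intro xs hn expression s groups hxs
    set w := xs.takeWhile (fun x => !pvIsOp x) with hw_def
    set d := xs.dropWhile (fun x => !pvIsOp x) with hd_def
    have hsplit : w ++ d = xs := List.takeWhile_append_dropWhile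
    have hw : ∀ x ∈ w, ¬ pvIsOp x := by
      intro x hx; simpa using List.mem_takeWhile_imp hx
    have hlen : s + xs.length ≤ expression.length ∨ xs.length = expression.length - s := by
      right; rw [hxs]; simp
    have hxslen : xs.length = expression.length - s := by rw [hxs]; simp
    have henum : (PySem.List.enumerate xs (s : Int)).filter (fun p => pvIsOp p.2)
        = (PySem.List.enumerate d ((s : Int) + w.length)).filter (fun p => pvIsOp p.2) := by
      rw [← hsplit, PySem.List.enumerate_append, List.filter_append,
        pvOps_filter_nil w (s : Int) hw]
      simp
    cases hd : d with
    | nil =>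
      rw [henum, hd]
      simp only [PySem.List.enumerate_nil, List.filter_nil, List.foldl_nil]
      have hall : ∀ x ∈ xs, ¬ pvIsOp x := by
        intro x hx
        rw [← hsplit, hd] at hx
        exact hw x (by simpa using hx)
      rw [pvRuns_all_nonop xs hall]
      by_cases hnil : xs = []
      · subst hnil
        have hs : expression.length ≤ s := by
          have := congrArg List.length hxs; simp at this; omega
        simp
        omega
      · have hs : s < expression.length := by
          have : 0 < xs.length := List.length_pos_iff.mpr hnil
          omega
        rw [if_pos (by exact_mod_cast hs), PySem.List.slice_from_natCast, ← hxs]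
        simp [hnil]
    | cons y d' =>
      have hy : pvIsOp y := by
        have := pv_dropWhile_head (fun x => !pvIsOp x) xs y d' (by rw [← hd_def, hd])
        simpa using this
      rw [henum, hd]
      rw [PySem.List.enumerate_cons]
      simp only [List.filter_cons, hy, if_pos, List.foldl_cons]
      -- the first fold step
      have hstep : pvBStep expression (groups, (s : Int)) ((s : Int) + w.length, y)
          = (groups ++ (if w ≠ [] then [w] else []) ++ [[y]], ((s + w.length + 1 : ℕ) : Int)) := by
        unfold pvBStep
        by_cases hwnil : w = []
        · rw [hwnil]
          simp
        · have hpos : 0 < w.length := List.length_pos_iff.mpr hwnil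
          have hgt : ((s : Int) < (s : Int) + w.length) := by
            have : (0 : Int) < w.length := by exact_mod_cast hpos
            omega
          rw [if_pos (by simpa using hgt)]
          have hcast : ((s : Int) + (w.length : Int)) = ((s + w.length : ℕ) : Int) := by push_cast; ring
          rw [hcast, PySem.List.slice_natCast]
          have hw_take : (expression.drop s).take (s + w.length - s) = w := by
            have hpre : w <+: xs := List.takeWhile_prefix _
            rw [← hxs]
            have := List.prefix_iff_eq_take.mp hpre
            simpa [Nat.add_sub_cancel_left] using this.symm
          rw [hw_take]
          simp [hwnil]
      rw [hstep]
      -- apply the induction hypothesis on d'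
      have hd'len : d'.length ≤ n := by
        have h1 : w.length + d.length = xs.length := by
          rw [← hsplit]; simp
        rw [hd] at h1; simp at h1; omega
      have hd'drop : d' = expression.drop (s + w.length + 1) := by
        have : xs.drop (w.length + 1) = d' := by
          rw [← hsplit, hd]
          have : (w ++ y :: d').drop (w.length + 1) = d' := by
            rw [show w.length + 1 = (w ++ [y]).length by simp,
              show w ++ y :: d' = (w ++ [y]) ++ d' by simp]
            exact List.drop_left
          exact this
        rw [hxs, List.drop_drop] at this
        rw [← this]; ring_nf
      have := ih d' hd'len expression (s + w.length + 1)
        (groups ++ (if w ≠ [] then [w] else []) ++ [[y]]) hd'drop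
      rw [show (s : Int) + (w.length : Int) + 1 = ((s + w.length + 1 : ℕ) : Int) by push_cast; ring]
      simp only at this ⊢
      rw [this]
      -- reassemble the right-hand side
      rw [pvRuns_head xs, ← hw_def, ← hd_def, hd]
      have : pvRuns (y :: d') = [y] :: pvRuns d' := by
        rw [pvRuns]; simp [hy]
      rw [this]
      by_cases hwnil : w = [] <;> simp [hwnil]

theorem pvB_eq_runs (expression : List String) :
    group_operations_alt expression = pvRuns expression := by
  have := pvB_invariant expression.length expression (le_refl _) expression 0 [] (by simp)
  simpa [group_operations_alt, pvOps] using this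

-- ===== VERDICT (by name: the statement is the Claim_ definition above) =====
theorem group_operations_spec : Claim_equal_group_operations := by
  intro expression _
  unfold Spec_group_operations
  rw [pvA_eq_runs, pvB_eq_runs]
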